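-- pv_equiv track=rewrite | github.com/msamuel26/programming | latihan_4.py | shown_first_3_odd_keys_and_first_3_even_keys
-- ===== SOURCE A (Python) =====
-- def even_number(input_int):
--     output = False
--     if input_int % 2 == 0:
--         output = True
--     return output
--
-- def odd_number(input_int):
--     output = False
--     if input_int % 2 == 1:
--         output = True
--     return output
--
-- def shown_first_3_odd_keys_and_first_3_even_keys(input_dict, input_odd, input_even):
--     output_dict = {}
--     max = 0
--     for key in input_dict:
--         if even_number(key) and max < input_even:
--             output_dict[key] = input_dict[key]
--             max = max + 1
--
--     max = 0
--     for key in input_dict: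
--         if odd_number(key) and max < input_odd:
--             output_dict[key] = input_dict[key]
--             max = max + 1
--     return output_dict
-- ===== SOURCE B (Python) =====
-- def shown_first_3_odd_keys_and_first_3_even_keys(input_dict, input_odd, input_even):
--     evens, odds = [], []
--     e, o = input_even, input_odd
--     for k, v in input_dict.items():
--         if e <= 0 and o <= 0:
--             break
--         if k % 2 == 0:
--             if e > 0:
--                 evens.append((k, v))
--                 e -= 1
--         elif o > 0:
--             odds.append((k, v))
--             o -= 1
--     return dict(evens + odds)
-- ===== Notes on version B (the rewrite author's own statement) =====
-- stated objective: alternative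
-- what changed: Replaces A's two sequential counter-and-dict-mutation passes (each re-looking every selected key up in the input dict) with one single pass over the items that maintains two countdown budgets and breaks early once both are exhausted, collecting the even and odd picks into two lists and building the result dict once at the end; Pre_ excludes association lists with duplicate keys, which cannot arise from a Python dict.
import Mathlib
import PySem

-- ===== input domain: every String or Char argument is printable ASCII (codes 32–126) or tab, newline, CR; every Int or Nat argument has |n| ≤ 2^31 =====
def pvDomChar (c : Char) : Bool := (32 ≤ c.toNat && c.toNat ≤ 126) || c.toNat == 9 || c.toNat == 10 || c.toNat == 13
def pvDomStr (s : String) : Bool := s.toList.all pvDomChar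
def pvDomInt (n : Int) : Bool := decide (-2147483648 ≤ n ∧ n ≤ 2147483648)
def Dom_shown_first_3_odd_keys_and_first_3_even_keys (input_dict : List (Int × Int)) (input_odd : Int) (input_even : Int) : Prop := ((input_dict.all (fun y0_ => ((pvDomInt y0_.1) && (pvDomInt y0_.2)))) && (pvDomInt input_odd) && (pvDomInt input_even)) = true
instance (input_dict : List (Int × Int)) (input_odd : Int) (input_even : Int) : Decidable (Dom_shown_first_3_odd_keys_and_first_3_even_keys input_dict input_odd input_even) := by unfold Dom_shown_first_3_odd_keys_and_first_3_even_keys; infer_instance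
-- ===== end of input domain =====

-- B replaces A's two counter-driven dict-mutation passes by ONE pass over the items with two
-- countdown budgets and an early break, building the result dict once at the end (alternative).

-- ===== PORT A =====
def even_number (input_int : Int) : Bool :=
  let output := false
  if PySem.Int.mod input_int 2 = 0 then true else output

def odd_number (input_int : Int) : Bool :=
  let output := false
  if PySem.Int.mod input_int 2 = 1 then true else output

-- 'for key in input_dict' iterates keys; input_dict[key] is a lookup in the dict
-- (always present, so getD's default is never used).
def shown_first_3_odd_keys_and_first_3_even_keys (input_dict : List (Int × Int)) (input_odd : Int) (input_even : Int) : List (Int × Int) :=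
  let din : PySem.Dict Int Int := PySem.Dict.mk input_dict
  let s1 := input_dict.foldl (fun (st : PySem.Dict Int Int × Int) kv =>
      if even_number kv.1 && decide (st.2 < input_even) then
        (st.1.insert kv.1 (din.getD kv.1 0), st.2 + 1)
      else st) (PySem.Dict.empty, 0)
  let s2 := input_dict.foldl (fun (st : PySem.Dict Int Int × Int) kv =>
      if odd_number kv.1 && decide (st.2 < input_odd) then
        (st.1.insert kv.1 (din.getD kv.1 0), st.2 + 1)
      else st) (s1.1, 0)
  s2.1.items

-- ===== PORT B =====
-- B's single for-loop with 'break': the loop over the remaining items with the two budgets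
-- (e, o), stopping when both are exhausted; returns (evens, odds) in order of collection.
def pvGoB : List (Int × Int) → Int → Int → List (Int × Int) × List (Int × Int)
  | [], _, _ => ([], [])
  | kv :: rest, e, o =>
    if e ≤ 0 ∧ o ≤ 0 then ([], [])
    else if PySem.Int.mod kv.1 2 = 0 then
      if 0 < e then
        let p := pvGoB rest (e - 1) o
        (kv :: p.1, p.2)
      else pvGoB rest e o
    else if 0 < o then
      let p := pvGoB rest e (o - 1)
      (p.1, kv :: p.2)
    else pvGoB rest e o

-- dict(evens + odds) is PySem.Dict.ofList on the concatenation.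
def shown_first_3_odd_keys_and_first_3_even_keys_alt (input_dict : List (Int × Int)) (input_odd : Int) (input_even : Int) : List (Int × Int) :=
  let p := pvGoB input_dict input_even input_odd
  (PySem.Dict.ofList (p.1 ++ p.2)).items

-- ===== PRECONDITION & SPEC =====
-- Pre_ excludes association lists with duplicate keys: they cannot arise from an actual
-- Python dict, and any behaviour on them is an artefact of the List encoding.
def Pre_shown_first_3_odd_keys_and_first_3_even_keys (input_dict : List (Int × Int)) (input_odd : Int) (input_even : Int) : Prop :=
  (input_dict.map Prod.fst).Nodup
instance (input_dict : List (Int × Int)) (input_odd : Int) (input_even : Int) : Decidable (Pre_shown_first_3_odd_keys_and_first_3_even_keys input_dict input_odd input_even) := by unfold Pre_shown_first_3_odd_keys_and_first_3_even_keys; infer_instance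

def pvWitness_shown_first_3_odd_keys_and_first_3_even_keys : (List (Int × Int)) × Int × Int := ([(-4, 1), (3, 5), (2, 7), (9, 0)], 3, 3)

def Spec_shown_first_3_odd_keys_and_first_3_even_keys (input_dict : List (Int × Int)) (input_odd : Int) (input_even : Int) (out : List (Int × Int)) : Prop := out = shown_first_3_odd_keys_and_first_3_even_keys_alt input_dict input_odd input_even
instance (input_dict : List (Int × Int)) (input_odd : Int) (input_even : Int) (out : List (Int × Int)) : Decidable (Spec_shown_first_3_odd_keys_and_first_3_even_keys input_dict input_odd input_even out) := by unfold Spec_shown_first_3_odd_keys_and_first_3_even_keys; infer_instance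

-- ===== CLAIM (what is proved, stated in full; the proofs are below) =====
def Claim_equal_shown_first_3_odd_keys_and_first_3_even_keys : Prop := ∀ (input_dict : List (Int × Int)) (input_odd : Int) (input_even : Int), Dom_shown_first_3_odd_keys_and_first_3_even_keys input_dict input_odd input_even → Pre_shown_first_3_odd_keys_and_first_3_even_keys input_dict input_odd input_even → Spec_shown_first_3_odd_keys_and_first_3_even_keys input_dict input_odd input_even (shown_first_3_odd_keys_and_first_3_even_keys input_dict input_odd input_even)

-- ===== LEMMAS AND PROOFS =====

-- Generic invariant for A's loops: over fresh distinct keys, a bounded insert loop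
-- appends the first (bound - c) items whose key satisfies P.
lemma pv_loop_inv (din : PySem.Dict Int Int) (P : Int → Bool) (bound : Int) :
    ∀ (xs : List (Int × Int)) (d : PySem.Dict Int Int) (c : Int),
    (∀ kv ∈ xs, din.getD kv.1 (0 : Int) = kv.2) →
    (d.keys ++ (xs.filter (fun kv => P kv.1)).map Prod.fst).Nodup →
    (xs.foldl (fun (st : PySem.Dict Int Int × Int) kv =>
        if P kv.1 && decide (st.2 < bound) then
          (st.1.insert kv.1 (din.getD kv.1 0), st.2 + 1)
        else st) (d, c)).1.items
      = d.items ++ (xs.filter (fun kv => P kv.1)).take ((bound - c).toNat) := by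
  intro xs
  induction xs with
  | nil => intro d c _ _; simp
  | cons kv rest ih =>
    intro d c hlook hnd
    by_cases hP : P kv.1 = true
    · by_cases hc : c < bound
      · have hmem : kv.1 ∉ d.keys := by
          intro h
          have hnd' := hnd
          simp [hP, List.nodup_append] at hnd'
          exact (hnd'.2.2 kv.1 h).1 rfl
        have hcont : d.contains kv.1 = false := by
          rw [Bool.eq_false_iff]
          intro h; exact hmem ((PySem.Dict.contains_iff_mem_keys d kv.1).1 h)
        have hval : din.getD kv.1 (0 : Int) = kv.2 := hlook kv (by simp)
        have hcond : (P kv.1 && decide (c < bound)) = true := by simp [hP, hc]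
        rw [List.foldl_cons]
        simp only [hcond, if_true]
        rw [ih (d.insert kv.1 (din.getD kv.1 0)) (c + 1)
            (fun p hp => hlook p (List.mem_cons_of_mem kv hp))
            (by rw [PySem.Dict.keys_insert_of_not_contains d _ hcont]
                have h2 : (d.keys ++ [kv.1]) ++ (rest.filter (fun kv => P kv.1)).map Prod.fst
                    = d.keys ++ kv.1 :: (rest.filter (fun kv => P kv.1)).map Prod.fst := by simp
                rw [h2]
                simpa [List.filter_cons, hP] using hnd)]
        rw [PySem.Dict.items_insert_of_not_contains d _ hcont, hval]
        have htake : (bound - c).toNat = ((bound - (c + 1)).toNat) + 1 := by omega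
        simp [hP, htake, List.take_succ_cons]
      · have hz : (bound - c).toNat = 0 := by omega
        have hcond : (P kv.1 && decide (c < bound)) = false := by simp [hc]
        rw [List.foldl_cons]
        simp only [hcond, Bool.false_eq_true, if_false]
        rw [ih d c (fun p hp => hlook p (List.mem_cons_of_mem kv hp))
            (List.Nodup.sublist (List.Sublist.append_left (List.Sublist.map _
              (List.Sublist.filter _ (List.sublist_cons_self kv rest))) _) hnd)]
        simp [hP, hz]
    · have hcond : (P kv.1 && decide (c < bound)) = false := by simp [hP]
      rw [List.foldl_cons]
      simp only [hcond, Bool.false_eq_true, if_false]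
      rw [ih d c (fun p hp => hlook p (List.mem_cons_of_mem kv hp))
          (by simpa [List.filter_cons, hP] using hnd)]
      simp [hP]

lemma pv_even_eq (k : Int) : even_number k = decide (PySem.Int.mod k 2 = 0) := by
  simp [even_number]

lemma pv_odd_eq (k : Int) : odd_number k = decide (¬ (PySem.Int.mod k 2 = 0)) := by
  rcases PySem.Int.mod_two_eq k with h | h <;> simp [odd_number, h]

-- B's single pass computes exactly: the first e even items and the first o odd items.
lemma pvGoB_spec (xs : List (Int × Int)) : ∀ (e o : Int),
    pvGoB xs e o =
      ((xs.filter (fun kv => decide (PySem.Int.mod kv.1 2 = 0))).take (max e 0).toNat,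
       (xs.filter (fun kv => decide (¬ (PySem.Int.mod kv.1 2 = 0)))).take (max o 0).toNat) := by
  induction xs with
  | nil => intro e o; simp [pvGoB]
  | cons kv rest ih =>
    intro e o
    by_cases hstop : e ≤ 0 ∧ o ≤ 0
    · have he : (max e 0).toNat = 0 := by omega
      have ho : (max o 0).toNat = 0 := by omega
      simp [pvGoB, hstop, he, ho]
    · by_cases hk : PySem.Int.mod kv.1 2 = 0
      · have hk2 : (2 : Int) ∣ kv.1 := (PySem.Int.mod_eq_zero_iff_dvd kv.1 2).1 hk
        have hk3 : ¬ (kv.1 % 2 = 1) := by omega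
        by_cases he : 0 < e
        · have hte : (max e 0).toNat = (max (e - 1) 0).toNat + 1 := by omega
          simp [pvGoB, hstop, hk, he, hk2, hk3, ih, hte, List.filter_cons]
        · have hte : (max e 0).toNat = 0 := by omega
          simp [pvGoB, hstop, hk, he, hk2, hk3, ih, hte, List.filter_cons]
      · have hk2 : ¬ ((2 : Int) ∣ kv.1) := fun h => hk ((PySem.Int.mod_eq_zero_iff_dvd kv.1 2).2 h)
        have hk3 : kv.1 % 2 = 1 := by omega
        by_cases ho : 0 < o
        · have hto : (max o 0).toNat = (max (o - 1) 0).toNat + 1 := by omega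
          simp [pvGoB, hstop, hk, ho, hk2, hk3, ih, hto, List.filter_cons]
        · have hto : (max o 0).toNat = 0 := by omega
          simp [pvGoB, hstop, hk, ho, hk2, hk3, ih, hto, List.filter_cons]

-- dict() of an association list with distinct keys is the identity on the item list.
lemma pv_ofList_items (l : List (Int × Int)) (h : (l.map Prod.fst).Nodup) :
    (PySem.Dict.ofList l).items = l := by
  have hf : ∀ kv ∈ l, (PySem.Dict.empty : PySem.Dict Int Int).contains kv.1 = false := by
    intro kv _; simp [PySem.Dict.contains_empty]
  have hmain := PySem.Dict.items_foldl_insert_fresh (l := l) (k := Prod.fst) (v := Prod.snd)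
      (d := (PySem.Dict.empty : PySem.Dict Int Int)) hf h
  simpa [PySem.Dict.ofList, PySem.Dict.update, PySem.Dict.empty] using hmain

-- ===== VERDICT (by name: the statement is the Claim_ definition above) =====
theorem shown_first_3_odd_keys_and_first_3_even_keys_spec : Claim_equal_shown_first_3_odd_keys_and_first_3_even_keys := by
  intro input_dict input_odd input_even _ hpre
  unfold Spec_shown_first_3_odd_keys_and_first_3_even_keys
  unfold shown_first_3_odd_keys_and_first_3_even_keys shown_first_3_odd_keys_and_first_3_even_keys_alt
  dsimp only
  have hpre' : (input_dict.map Prod.fst).Nodup := hpre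
  have hlook : ∀ kv ∈ input_dict, (PySem.Dict.mk input_dict).getD kv.1 (0 : Int) = kv.2 := by
    intro kv hkv
    have hm : (kv.1, kv.2) ∈ (PySem.Dict.mk input_dict).items := by simpa using hkv
    exact PySem.Dict.getD_of_mem_items (PySem.Dict.mk input_dict) hm hpre' 0
  have ndE : ((input_dict.filter (fun kv => even_number kv.1)).map Prod.fst).Nodup :=
    List.Nodup.sublist (List.Sublist.map _ (List.filter_sublist)) hpre'
  have ndO : ((input_dict.filter (fun kv => odd_number kv.1)).map Prod.fst).Nodup :=
    List.Nodup.sublist (List.Sublist.map _ (List.filter_sublist)) hpre'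
  have h1 := pv_loop_inv (PySem.Dict.mk input_dict) even_number input_even input_dict
      PySem.Dict.empty 0 hlook (by simpa [PySem.Dict.empty] using ndE)
  have hkeys1 : (List.foldl (fun (st : PySem.Dict Int Int × Int) kv =>
        if even_number kv.1 && decide (st.2 < input_even) then
          (st.1.insert kv.1 ((PySem.Dict.mk input_dict).getD kv.1 0), st.2 + 1)
        else st) (PySem.Dict.empty, 0) input_dict).1.keys
      = ((input_dict.filter (fun kv => even_number kv.1)).take ((input_even - 0).toNat)).map Prod.fst := by
    show (List.foldl _ (PySem.Dict.empty, 0) input_dict).1.items.map Prod.fst = _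
    rw [h1]; simp [PySem.Dict.empty]
  have ndstep : ((List.foldl (fun (st : PySem.Dict Int Int × Int) kv =>
        if even_number kv.1 && decide (st.2 < input_even) then
          (st.1.insert kv.1 ((PySem.Dict.mk input_dict).getD kv.1 0), st.2 + 1)
        else st) (PySem.Dict.empty, 0) input_dict).1.keys
        ++ (input_dict.filter (fun kv => odd_number kv.1)).map Prod.fst).Nodup := by
    rw [hkeys1]
    refine List.Nodup.append ?_ ndO ?_
    · exact List.Nodup.sublist (List.Sublist.map _ (List.take_sublist _ _)) ndE
    · intro k hk1 hk2
      simp only [List.mem_map] at hk1 hk2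
      obtain ⟨p, hp, hpk⟩ := hk1
      obtain ⟨q, hq, hqk⟩ := hk2
      have hpe : even_number p.1 = true := (List.mem_filter.1 (List.mem_of_mem_take hp)).2
      have hqo : odd_number q.1 = true := (List.mem_filter.1 hq).2
      rw [pv_even_eq] at hpe
      rw [pv_odd_eq] at hqo
      simp at hpe hqo
      rw [hpk] at hpe
      rw [hqk] at hqo
      omega
  have h2 := pv_loop_inv (PySem.Dict.mk input_dict) odd_number input_odd input_dict
      (List.foldl (fun (st : PySem.Dict Int Int × Int) kv =>
        if even_number kv.1 && decide (st.2 < input_even) then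
          (st.1.insert kv.1 ((PySem.Dict.mk input_dict).getD kv.1 0), st.2 + 1)
        else st) (PySem.Dict.empty, 0) input_dict).1 0 hlook ndstep
  rw [h2, h1]
  -- now the B side
  rw [pvGoB_spec]
  dsimp only
  have hfe : (fun (kv : Int × Int) => even_number kv.1)
      = fun kv => decide (PySem.Int.mod kv.1 2 = 0) := by
    funext kv; exact pv_even_eq kv.1
  have hfo : (fun (kv : Int × Int) => odd_number kv.1)
      = fun kv => decide (¬ (PySem.Int.mod kv.1 2 = 0)) := by
    funext kv; exact pv_odd_eq kv.1
  have hte : (input_even - 0).toNat = (max input_even 0).toNat := by omega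
  have hto : (input_odd - 0).toNat = (max input_odd 0).toNat := by omega
  rw [pv_ofList_items]
  · rw [hfe, hfo, hte, hto]; simp [PySem.Dict.empty]
  · rw [List.map_append]
    refine List.Nodup.append ?_ ?_ ?_
    · exact List.Nodup.sublist (List.Sublist.map _ (List.take_sublist _ _))
        (List.Nodup.sublist (List.Sublist.map _ (List.filter_sublist)) hpre')
    · exact List.Nodup.sublist (List.Sublist.map _ (List.take_sublist _ _))
        (List.Nodup.sublist (List.Sublist.map _ (List.filter_sublist)) hpre')
    · intro k hk1 hk2
      simp only [List.mem_map] at hk1 hk2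
      obtain ⟨p, hp, hpk⟩ := hk1
      obtain ⟨q, hq, hqk⟩ := hk2
      have hpe := (List.mem_filter.1 (List.mem_of_mem_take hp)).2
      have hqo := (List.mem_filter.1 (List.mem_of_mem_take hq)).2
      simp at hpe hqo
      rw [hpk] at hpe
      rw [hqk] at hqo
      omega
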